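-- pv_equiv track=rewrite | github.com/Smokierpizza17/AdventOfCode | (14) dockingData/part2.py | applyBitmask
-- ===== SOURCE A (Python) =====
-- def applyBitmask(bitMask, bitStr):
--     '''returns bitStr with bitmask applied'''
--     maskMap = {}
--     for index, value in enumerate(bitMask):
--         if value == "X" or value == "1":
--             maskMap[index] = value
--
--     outStr = list(bitStr)
--     for index, value in enumerate(bitStr):
--         if index in maskMap.keys():
--             outStr[index] = maskMap[index]
--     return "".join(outStr)
-- ===== SOURCE B (Python) =====
-- def applyBitmask(bitMask, bitStr):
--     '''returns bitStr with bitmask applied'''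
--     merged = [m if m in ('X', '1') else b for m, b in zip(bitMask, bitStr)]
--     return "".join(merged) + bitStr[len(bitMask):]
-- ===== Notes on version B (the rewrite author's own statement) =====
-- stated objective: simpler
-- what changed: Replaced A's two staged passes (build an index->mask-char dict over bitMask, then overwrite a char list of bitStr through dict lookups) by a zip-merge: one comprehension over zip(bitMask, bitStr) choosing the mask char when it is 'X'/'1', concatenated with the untouched tail slice bitStr[len(bitMask):] -- no indices, no dict, no mutation.
import Mathlib
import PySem

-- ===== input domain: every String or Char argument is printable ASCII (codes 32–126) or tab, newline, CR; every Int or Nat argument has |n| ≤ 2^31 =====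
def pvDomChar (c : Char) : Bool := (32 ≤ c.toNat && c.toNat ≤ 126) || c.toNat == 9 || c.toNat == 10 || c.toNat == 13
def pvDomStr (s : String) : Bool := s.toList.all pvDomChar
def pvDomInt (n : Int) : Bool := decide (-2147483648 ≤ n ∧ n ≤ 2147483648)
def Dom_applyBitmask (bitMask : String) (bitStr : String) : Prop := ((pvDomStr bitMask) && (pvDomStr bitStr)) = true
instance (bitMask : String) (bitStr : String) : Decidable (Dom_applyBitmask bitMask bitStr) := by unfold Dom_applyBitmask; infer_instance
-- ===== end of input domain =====

-- B replaces A's two staged index-driven passes (index→mask-char dict, then in-place overwriting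
-- of a char list through dict lookups) by an index-free zip-merge of the two strings plus the
-- untouched tail slice of bitStr (objective: simpler).

-- ===== PORT A =====
-- the first loop: maskMap = {}; for index, value in enumerate(bitMask): if value == "X" or value == "1": maskMap[index] = value
def pvMaskFold (m : List Char) (s0 : Int) (d : PySem.Dict Int Char) : PySem.Dict Int Char :=
  (PySem.List.enumerate m s0).foldl
    (fun d p => if p.2 = 'X' ∨ p.2 = '1' then d.insert p.1 p.2 else d) d

-- the second loop: for index, value in enumerate(bitStr): if index in maskMap.keys(): outStr[index] = maskMap[index]
def pvApplyFold (d : PySem.Dict Int Char) (s : List Char) (s0 : Int) (out : List Char) : List Char :=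
  (PySem.List.enumerate s s0).foldl
    (fun out p => if d.contains p.1 then PySem.List.pySetD out p.1 ((d.get? p.1).getD p.2) else out) out

def applyBitmask (bitMask : String) (bitStr : String) : String :=
  let maskMap := pvMaskFold bitMask.toList 0 PySem.Dict.empty
  let outStr := bitStr.toList
  String.ofList (pvApplyFold maskMap bitStr.toList 0 outStr)

-- ===== PORT B =====
-- [m if m in ('X','1') else b for m, b in zip(bitMask, bitStr)] joined, + bitStr[len(bitMask):]
def applyBitmask_alt (bitMask : String) (bitStr : String) : String :=
  String.ofList <|
    (List.zipWith (fun m b => if m = 'X' ∨ m = '1' then m else b) bitMask.toList bitStr.toList)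
    ++ PySem.List.slice bitStr.toList (some (bitMask.toList.length : Int)) none

-- ===== PRECONDITION & SPEC =====
def Spec_applyBitmask (bitMask : String) (bitStr : String) (out : String) : Prop := out = applyBitmask_alt bitMask bitStr
instance (bitMask : String) (bitStr : String) (out : String) : Decidable (Spec_applyBitmask bitMask bitStr out) := by unfold Spec_applyBitmask; infer_instance

-- ===== CLAIM (what is proved, stated in full; the proofs are below) =====
def Claim_equal_applyBitmask : Prop := ∀ (bitMask : String) (bitStr : String), Dom_applyBitmask bitMask bitStr → Spec_applyBitmask bitMask bitStr (applyBitmask bitMask bitStr)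

-- ===== LEMMAS AND PROOFS =====

-- the dict never holds a key outside the enumerated index range
lemma pvMaskFold_get_out (m : List Char) (s0 : Int) (d : PySem.Dict Int Char) (i : Int)
    (h : ∀ j : Nat, j < m.length → i ≠ s0 + j) :
    (pvMaskFold m s0 d).get? i = d.get? i := by
  induction m generalizing d s0 with
  | nil => simp [pvMaskFold]
  | cons x xs ih =>
    simp only [pvMaskFold, PySem.List.enumerate_cons, List.foldl_cons]
    rw [show ((PySem.List.enumerate xs (s0+1)).foldl
        (fun d p => if p.2 = 'X' ∨ p.2 = '1' then d.insert p.1 p.2 else d)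
        (if x = 'X' ∨ x = '1' then d.insert s0 x else d)) = pvMaskFold xs (s0+1)
        (if x = 'X' ∨ x = '1' then d.insert s0 x else d) from rfl]
    rw [ih _ _ (fun j hj => by
      have := h (j+1) (by simp; omega); push_cast at this; omega)]
    have hi0 : i ≠ s0 := by
      have := h 0 (by simp); simpa using this
    split_ifs with hx
    · exact PySem.Dict.get?_insert_of_ne _ _ hi0
    · rfl

-- the dict's value at an in-range index
lemma pvMaskFold_get (m : List Char) (s0 : Int) (d : PySem.Dict Int Char) (k : Nat)
    (hk : k < m.length) :
    (pvMaskFold m s0 d).get? (s0 + k) =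
      if m[k] = 'X' ∨ m[k] = '1' then some m[k] else d.get? (s0 + k) := by
  induction m generalizing d s0 k with
  | nil => simp at hk
  | cons x xs ih =>
    simp only [pvMaskFold, PySem.List.enumerate_cons, List.foldl_cons]
    rw [show ((PySem.List.enumerate xs (s0+1)).foldl
        (fun d p => if p.2 = 'X' ∨ p.2 = '1' then d.insert p.1 p.2 else d)
        (if x = 'X' ∨ x = '1' then d.insert s0 x else d)) = pvMaskFold xs (s0+1)
        (if x = 'X' ∨ x = '1' then d.insert s0 x else d) from rfl]
    cases k with
    | zero =>
      simp only [Nat.cast_zero, add_zero, List.getElem_cons_zero]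
      rw [pvMaskFold_get_out xs (s0+1) _ s0 (fun j hj => by omega)]
      split_ifs with hx
      · simp [PySem.Dict.get?_insert_self]
      · rfl
    | succ k =>
      have hk' : k < xs.length := by simpa using hk
      have harith : s0 + (↑(k+1) : Int) = (s0 + 1) + ↑k := by push_cast; omega
      rw [harith, ih (s0+1) _ k hk']
      simp only [List.getElem_cons_succ]
      by_cases hx : xs[k] = 'X' ∨ xs[k] = '1'
      · simp [hx]
      · simp only [hx, if_false]
        split_ifs with hz
        · exact PySem.Dict.get?_insert_of_ne _ _ (by omega)
        · rfl

-- the overwrite loop, characterised elementwise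
lemma pvApplyFold_get (d : PySem.Dict Int Char) (s : List Char) (n0 : Nat) (out : List Char)
    (hlen : out.length = n0 + s.length) (k : Nat) :
    (pvApplyFold d s (n0 : Int) out)[k]? =
      if n0 ≤ k ∧ k - n0 < s.length ∧ d.contains (k : Int) then d.get? (k : Int)
      else out[k]? := by
  induction s generalizing n0 out with
  | nil => simp [pvApplyFold]
  | cons x xs ih =>
    simp only [pvApplyFold, PySem.List.enumerate_cons, List.foldl_cons]
    have hstep : ∀ out', ((PySem.List.enumerate xs ((n0:Int)+1)).foldl
        (fun out p => if d.contains p.1 then PySem.List.pySetD out p.1 ((d.get? p.1).getD p.2) else out) out')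
        = pvApplyFold d xs ((n0+1 : Nat) : Int) out' := by
      intro out'; simp [pvApplyFold]
    set out' := if d.contains (n0:Int) then PySem.List.pySetD out (n0:Int) ((d.get? (n0:Int)).getD x) else out with hout'
    have hlen' : out'.length = (n0+1) + xs.length := by
      rw [hout']; split_ifs
      · rw [PySem.List.length_pySetD]; simp at hlen; omega
      · simp at hlen; omega
    rw [hstep out', ih (n0+1) out' hlen']
    have hgetk : out'[k]? = if k = n0 ∧ d.contains (k:Int) then d.get? (k:Int) else out[k]? := by
      rw [hout']
      by_cases hc : d.contains (n0:Int)
      · rw [if_pos hc, PySem.List.pySetD_natCast, List.getElem?_set]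
        by_cases hkn : k = n0
        · subst hkn
          have hin : k < out.length := by simp at hlen; omega
          have hs : (d.get? (k:Int)).isSome := by
            rw [← PySem.Dict.contains_eq_isSome_get?]; exact hc
          obtain ⟨v, hv⟩ := Option.isSome_iff_exists.mp hs
          simp [hin, hc, hv]
        · rw [if_neg (by omega), if_neg (by rintro ⟨h, -⟩; exact hkn h)]
      · rw [if_neg hc]
        by_cases hkn : k = n0
        · subst hkn; simp [hc]
        · rw [if_neg (by rintro ⟨h, -⟩; exact hkn h)]
    rw [hgetk]
    by_cases hc : d.contains (k:Int)
    · by_cases hkn : k = n0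
      · subst hkn; simp [hc]
      · rw [show (if k = n0 ∧ d.contains (k:Int) then d.get? (k:Int) else out[k]?) = out[k]?
            from if_neg (by rintro ⟨h, -⟩; exact hkn h)]
        simp only [List.length_cons]
        by_cases h1 : n0 ≤ k ∧ k - n0 < xs.length + 1
        · rw [if_pos ⟨by omega, by omega, hc⟩, if_pos ⟨h1.1, h1.2, hc⟩]
        · rw [if_neg (by rintro ⟨a, b, -⟩; exact h1 ⟨by omega, by omega⟩),
              if_neg (by rintro ⟨a, b, -⟩; exact h1 ⟨a, b⟩)]
    · simp [hc]

-- B's zip-merge + tail, characterised elementwise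
lemma alt_get (m s : List Char) (k : Nat) :
    ((List.zipWith (fun a b => if a = 'X' ∨ a = '1' then a else b) m s) ++ s.drop m.length)[k]? =
      if hk : k < s.length then
        some (if hm : k < m.length then (if m[k] = 'X' ∨ m[k] = '1' then m[k] else s[k]) else s[k])
      else none := by
  by_cases hmin : k < min m.length s.length
  · have hk : k < s.length := by omega
    have hm : k < m.length := by omega
    rw [List.getElem?_append_left (by simp [List.length_zipWith]; omega)]
    rw [List.getElem?_zipWith_eq_some.mpr ⟨m[k], s[k], List.getElem?_eq_getElem hm,
        List.getElem?_eq_getElem hk, rfl⟩]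
    simp [hk, hm]
  · rw [List.getElem?_append_right (by simp [List.length_zipWith]; omega)]
    simp only [List.length_zipWith, List.getElem?_drop]
    by_cases hk : k < s.length
    · have hm : ¬ k < m.length := by omega
      have hmle : m.length ≤ s.length := by omega
      have : m.length + (k - min m.length s.length) = k := by omega
      rw [this]
      simp [hk, hm]
    · have : s.length ≤ m.length + (k - min m.length s.length) := by omega
      simp only [hk, dif_neg, not_false_iff]
      rw [List.getElem?_eq_none this]

-- ===== VERDICT (by name: the statement is the Claim_ definition above) =====
theorem applyBitmask_spec : Claim_equal_applyBitmask := by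
  intro bitMask bitStr _
  unfold Spec_applyBitmask applyBitmask applyBitmask_alt
  set m := bitMask.toList with hm
  set s := bitStr.toList with hs
  simp only []
  rw [PySem.List.slice_from_natCast]
  congr 1
  apply List.ext_getElem?
  intro k
  have hA := pvApplyFold_get (pvMaskFold m 0 PySem.Dict.empty) s 0 s (by simp) k
  rw [show ((0 : Nat) : Int) = (0 : Int) from rfl] at hA
  rw [hA, alt_get]
  by_cases hk : k < s.length
  · have hsk : s[k]? = some s[k] := List.getElem?_eq_getElem hk
    by_cases hkm : k < m.length
    · have hget : (pvMaskFold m 0 PySem.Dict.empty).get? (k : Int) =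
          if m[k] = 'X' ∨ m[k] = '1' then some m[k] else none := by
        have h := pvMaskFold_get m 0 PySem.Dict.empty k hkm
        simp only [zero_add, PySem.Dict.get?_empty] at h
        exact h
      by_cases hx : m[k] = 'X' ∨ m[k] = '1'
      · have hc : (pvMaskFold m 0 PySem.Dict.empty).contains (k : Int) = true := by
          rw [PySem.Dict.contains_eq_isSome_get?, hget, if_pos hx]; rfl
        rw [if_pos ⟨Nat.zero_le k, by omega, hc⟩, hget, if_pos hx]
        simp [hk, hkm, hx]
      · have hc : (pvMaskFold m 0 PySem.Dict.empty).contains (k : Int) = false := by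
          rw [PySem.Dict.contains_eq_isSome_get?, hget, if_neg hx]; rfl
        rw [if_neg (by simp [hc])]
        simp [hk, hkm, hx]
    · have hget : (pvMaskFold m 0 PySem.Dict.empty).get? (k : Int) = none := by
        rw [pvMaskFold_get_out m 0 PySem.Dict.empty (k : Int)
          (fun j hj => by omega)]
        simp
      have hc : (pvMaskFold m 0 PySem.Dict.empty).contains (k : Int) = false := by
        rw [PySem.Dict.contains_eq_isSome_get?, hget]; rfl
      rw [if_neg (by simp [hc])]
      simp [hk, hkm]
  · rw [if_neg (by rintro ⟨-, h, -⟩; omega)]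
    simp [hk]
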